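-- pv_equiv track=rewrite | github.com/lkmsf/adventOfCode- | 2021/day22/2.py | splitBoxByCoord
-- ===== SOURCE A (Python) =====
-- def volume(box):
--     minX, maxX, minY, maxY, minZ, maxZ = box
--     if maxX < minX or maxY < minY or maxZ < minZ: return 0
--     return (maxX - minX) * (maxY - minY) * (maxZ - minZ)
--
-- def splitBoxByX(box, x):
--     minX, maxX, minY, maxY, minZ, maxZ = box
--
--     if not (minX < x and x < maxX): return [box]
--
--     b1 = minX, x, minY, maxY, minZ, maxZ
--     b2 = x, maxX, minY, maxY, minZ, maxZ
--
--     result = [x for x in [b1, b2] if volume(x) > 0]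
--     return result
--
-- def splitBoxByY(box, y):
--     minX, maxX, minY, maxY, minZ, maxZ = box
--
--     if not (minY < y and y < maxY): return [box]
--
--     b1 = minX, maxX, minY, y, minZ, maxZ
--     b2 = minX, maxX, y, maxY, minZ, maxZ
--
--     result = [x for x in [b1, b2] if volume(x) > 0]
--     return result
--
-- def splitBoxByZ(box, z):
--     minX, maxX, minY, maxY, minZ, maxZ = box
--
--     if not (minZ < z and z < maxZ): return [box]
--
--     b1 = minX, maxX, minY, maxY, minZ, z
--     b2 = minX, maxX, minY, maxY, z, maxZ
--
--     result = [x for x in [b1, b2] if volume(x) > 0]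
--     return result
--
-- def splitBoxByCoord(box, x, y, z):
--     byY = []
--     byZ = []
--
--     byX = splitBoxByX(box, x)
--     for b in byX:
--         byY += splitBoxByY(b, y)
--     for b in byY:
--         byZ += splitBoxByZ(b, z)
--
--     return byZ
-- ===== SOURCE B (Python) =====
-- def volume(box):
--     minX, maxX, minY, maxY, minZ, maxZ = box
--     if maxX < minX or maxY < minY or maxZ < minZ: return 0
--     return (maxX - minX) * (maxY - minY) * (maxZ - minZ)
--
-- def splitBoxByCoord(box, x, y, z):
--     minX, maxX, minY, maxY, minZ, maxZ = box
--     xs = [(minX, x), (x, maxX)] if minX < x < maxX else [(minX, maxX)]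
--     ys = [(minY, y), (y, maxY)] if minY < y < maxY else [(minY, maxY)]
--     zs = [(minZ, z), (z, maxZ)] if minZ < z < maxZ else [(minZ, maxZ)]
--     sub = [(a, b, c, d, e, f) for (a, b) in xs for (c, d) in ys for (e, f) in zs]
--     if len(sub) == 1:
--         return sub
--     return [s for s in sub if volume(s) > 0]
-- ===== Notes on version B (the rewrite author's own statement) =====
-- stated objective: simpler
-- what changed: B replaces A's three-stage pipeline (split by x, then re-split each piece by y, then by z, filtering zero-volume halves at every stage) by building the three per-axis interval lists once, forming their nested product in one pass, and applying a single final volume filter (returning the lone box unfiltered when no axis is interior).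
import Mathlib
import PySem

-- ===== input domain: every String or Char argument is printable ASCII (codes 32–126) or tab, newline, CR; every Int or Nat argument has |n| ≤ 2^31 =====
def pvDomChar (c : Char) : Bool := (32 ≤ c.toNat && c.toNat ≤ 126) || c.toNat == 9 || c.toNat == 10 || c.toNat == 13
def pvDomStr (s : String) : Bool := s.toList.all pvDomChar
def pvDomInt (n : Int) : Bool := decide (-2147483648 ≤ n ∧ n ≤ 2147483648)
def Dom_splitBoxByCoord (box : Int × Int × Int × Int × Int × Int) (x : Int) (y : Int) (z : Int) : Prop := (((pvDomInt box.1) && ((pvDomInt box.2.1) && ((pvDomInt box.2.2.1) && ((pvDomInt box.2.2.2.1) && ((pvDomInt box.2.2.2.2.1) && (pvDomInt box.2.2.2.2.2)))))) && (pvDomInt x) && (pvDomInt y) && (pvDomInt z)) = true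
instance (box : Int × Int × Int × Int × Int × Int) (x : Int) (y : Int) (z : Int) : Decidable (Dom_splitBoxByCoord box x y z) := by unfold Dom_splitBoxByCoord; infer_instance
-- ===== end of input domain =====

-- B replaces A's three-stage split-and-filter pipeline by one nested product of
-- per-axis interval lists with a single final volume filter (objective: simpler).

-- ===== PORT A =====
def volume (box : Int × Int × Int × Int × Int × Int) : Int :=
  let (minX, maxX, minY, maxY, minZ, maxZ) := box
  if maxX < minX ∨ maxY < minY ∨ maxZ < minZ then 0
  else (maxX - minX) * (maxY - minY) * (maxZ - minZ)

def splitBoxByX (box : Int × Int × Int × Int × Int × Int) (x : Int) :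
    List (Int × Int × Int × Int × Int × Int) :=
  let (minX, maxX, minY, maxY, minZ, maxZ) := box
  if ¬ (minX < x ∧ x < maxX) then [box]
  else
    let b1 := (minX, x, minY, maxY, minZ, maxZ)
    let b2 := (x, maxX, minY, maxY, minZ, maxZ)
    List.filter (fun b => volume b > 0) [b1, b2]

def splitBoxByY (box : Int × Int × Int × Int × Int × Int) (y : Int) :
    List (Int × Int × Int × Int × Int × Int) :=
  let (minX, maxX, minY, maxY, minZ, maxZ) := box
  if ¬ (minY < y ∧ y < maxY) then [box]
  else
    let b1 := (minX, maxX, minY, y, minZ, maxZ)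
    let b2 := (minX, maxX, y, maxY, minZ, maxZ)
    List.filter (fun b => volume b > 0) [b1, b2]

def splitBoxByZ (box : Int × Int × Int × Int × Int × Int) (z : Int) :
    List (Int × Int × Int × Int × Int × Int) :=
  let (minX, maxX, minY, maxY, minZ, maxZ) := box
  if ¬ (minZ < z ∧ z < maxZ) then [box]
  else
    let b1 := (minX, maxX, minY, maxY, minZ, z)
    let b2 := (minX, maxX, minY, maxY, z, maxZ)
    List.filter (fun b => volume b > 0) [b1, b2]

def splitBoxByCoord (box : Int × Int × Int × Int × Int × Int) (x : Int) (y : Int) (z : Int) :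
    List (Int × Int × Int × Int × Int × Int) :=
  let byX := splitBoxByX box x
  let byY := byX.foldl (fun acc b => acc ++ splitBoxByY b y) []
  let byZ := byY.foldl (fun acc b => acc ++ splitBoxByZ b z) []
  byZ

-- ===== PORT B =====
def splitBoxByCoord_alt (box : Int × Int × Int × Int × Int × Int) (x : Int) (y : Int) (z : Int) :
    List (Int × Int × Int × Int × Int × Int) :=
  let (minX, maxX, minY, maxY, minZ, maxZ) := box
  let xs := if minX < x ∧ x < maxX then [(minX, x), (x, maxX)] else [(minX, maxX)]
  let ys := if minY < y ∧ y < maxY then [(minY, y), (y, maxY)] else [(minY, maxY)]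
  let zs := if minZ < z ∧ z < maxZ then [(minZ, z), (z, maxZ)] else [(minZ, maxZ)]
  let sub := xs.flatMap (fun ab =>
    ys.flatMap (fun cd =>
      zs.map (fun ef => (ab.1, ab.2, cd.1, cd.2, ef.1, ef.2))))
  if sub.length = 1 then sub
  else List.filter (fun s => volume s > 0) sub

-- ===== PRECONDITION & SPEC =====
def Spec_splitBoxByCoord (box : Int × Int × Int × Int × Int × Int) (x : Int) (y : Int) (z : Int) (out : List (Int × Int × Int × Int × Int × Int)) : Prop := out = splitBoxByCoord_alt box x y z
instance (box : Int × Int × Int × Int × Int × Int) (x : Int) (y : Int) (z : Int) (out : List (Int × Int × Int × Int × Int × Int)) : Decidable (Spec_splitBoxByCoord box x y z out) := by unfold Spec_splitBoxByCoord; infer_instance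

-- ===== CLAIM (what is proved, stated in full; the proofs are below) =====
def Claim_equal_splitBoxByCoord : Prop := ∀ (box : Int × Int × Int × Int × Int × Int) (x : Int) (y : Int) (z : Int), Dom_splitBoxByCoord box x y z → Spec_splitBoxByCoord box x y z (splitBoxByCoord box x y z)

-- ===== LEMMAS AND PROOFS =====

lemma volume_pos_iff (a b c d e f : Int) :
    0 < volume (a, b, c, d, e, f) ↔ a < b ∧ c < d ∧ e < f := by
  simp only [volume]
  split_ifs with h
  · omega
  · constructor
    · intro hp
      rw [mul_pos_iff] at hp
      rcases hp with ⟨hpq, hf⟩ | ⟨hpq, hf⟩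
      · rw [mul_pos_iff] at hpq
        rcases hpq with ⟨hb, hd⟩ | ⟨hb, hd⟩ <;> omega
      · rw [mul_neg_iff] at hpq
        rcases hpq with ⟨h1, h2⟩ | ⟨h1, h2⟩ <;> omega
    · rintro ⟨h1', h2', h3'⟩
      have k1 : (0:Int) < b - a := by omega
      have k2 : (0:Int) < d - c := by omega
      have k3 : (0:Int) < f - e := by omega
      positivity

-- ===== VERDICT (by name: the statement is the Claim_ definition above) =====
set_option maxHeartbeats 1000000 in
theorem splitBoxByCoord_spec : Claim_equal_splitBoxByCoord := by
  intro box x y z hdom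
  clear hdom
  unfold Spec_splitBoxByCoord
  obtain ⟨a, b, c, d, e, f⟩ := box
  by_cases hx : a < x ∧ x < b
  · by_cases hy : c < y ∧ y < d
    · by_cases hz : e < z ∧ z < f
      · simp [splitBoxByCoord, splitBoxByCoord_alt, splitBoxByX, splitBoxByY, splitBoxByZ, volume_pos_iff, List.filter, hx.1, hx.2, not_le.mpr hx.1, not_le.mpr hx.2, show a < b by omega, hy.1, hy.2, not_le.mpr hy.1, not_le.mpr hy.2, show c < d by omega, hz.1, hz.2, not_le.mpr hz.1, not_le.mpr hz.2, show e < f by omega]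
      · by_cases hef : e < f <;>
          simp [splitBoxByCoord, splitBoxByCoord_alt, splitBoxByX, splitBoxByY, splitBoxByZ, volume_pos_iff, List.filter, hx.1, hx.2, not_le.mpr hx.1, not_le.mpr hx.2, show a < b by omega, hy.1, hy.2, not_le.mpr hy.1, not_le.mpr hy.2, show c < d by omega, eq_false hz, eq_true (show e < z → f ≤ z by omega), hef]
    · by_cases hz : e < z ∧ z < f
      · by_cases hcd : c < d <;>
          simp [splitBoxByCoord, splitBoxByCoord_alt, splitBoxByX, splitBoxByY, splitBoxByZ, volume_pos_iff, List.filter, hx.1, hx.2, not_le.mpr hx.1, not_le.mpr hx.2, show a < b by omega, hz.1, hz.2, not_le.mpr hz.1, not_le.mpr hz.2, show e < f by omega, eq_false hy, eq_true (show c < y → d ≤ y by omega), hcd]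
      · by_cases hcd : c < d <;> by_cases hef : e < f <;>
          simp [splitBoxByCoord, splitBoxByCoord_alt, splitBoxByX, splitBoxByY, splitBoxByZ, volume_pos_iff, List.filter, hx.1, hx.2, not_le.mpr hx.1, not_le.mpr hx.2, show a < b by omega, eq_false hy, eq_true (show c < y → d ≤ y by omega), eq_false hz, eq_true (show e < z → f ≤ z by omega), hcd, hef]
  · by_cases hy : c < y ∧ y < d
    · by_cases hz : e < z ∧ z < f
      · by_cases hab : a < b <;>
          simp [splitBoxByCoord, splitBoxByCoord_alt, splitBoxByX, splitBoxByY, splitBoxByZ, volume_pos_iff, List.filter, hy.1, hy.2, not_le.mpr hy.1, not_le.mpr hy.2, show c < d by omega, hz.1, hz.2, not_le.mpr hz.1, not_le.mpr hz.2, show e < f by omega, eq_false hx, eq_true (show a < x → b ≤ x by omega), hab]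
      · by_cases hab : a < b <;> by_cases hef : e < f <;>
          simp [splitBoxByCoord, splitBoxByCoord_alt, splitBoxByX, splitBoxByY, splitBoxByZ, volume_pos_iff, List.filter, hy.1, hy.2, not_le.mpr hy.1, not_le.mpr hy.2, show c < d by omega, eq_false hx, eq_true (show a < x → b ≤ x by omega), eq_false hz, eq_true (show e < z → f ≤ z by omega), hab, hef]
    · by_cases hz : e < z ∧ z < f
      · by_cases hab : a < b <;> by_cases hcd : c < d <;>
          simp [splitBoxByCoord, splitBoxByCoord_alt, splitBoxByX, splitBoxByY, splitBoxByZ, volume_pos_iff, List.filter, hz.1, hz.2, not_le.mpr hz.1, not_le.mpr hz.2, show e < f by omega, eq_false hx, eq_true (show a < x → b ≤ x by omega), eq_false hy, eq_true (show c < y → d ≤ y by omega), hab, hcd]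
      · simp [splitBoxByCoord, splitBoxByCoord_alt, splitBoxByX, splitBoxByY, splitBoxByZ, volume_pos_iff, List.filter, eq_false hx, eq_true (show a < x → b ≤ x by omega), eq_false hy, eq_true (show c < y → d ≤ y by omega), eq_false hz, eq_true (show e < z → f ≤ z by omega)]
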